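-- pv_equiv track=rewrite | github.com/jagadeesh-kundrapu/parking-lot-allotment | RUNTIMETERROR_ModuleOfFunctionsUsed.py | validity_of_lots_bikes
-- ===== SOURCE A (Python) =====
-- def validity_of_lots_bikes(particular_lot, floors_for_bikes, columns_for_bikes, rows_for_bikes):
--     particular_lot += ','
--     j = -1
--     x = []
--     i = 0
--     while i < len(particular_lot):
--         if particular_lot[i] != ',':
--             pass
--         elif particular_lot[i] == ',':
--             if particular_lot[j + 1:i].isdigit():
--                 x.append(int(particular_lot[j + 1:i]))
--                 j = i
--         i += 1
--     if len(x) == 3 and 1 <= x[0] <= floors_for_bikes and 1 <= x[1] <= columns_for_bikes and 1 <= x[2] <= rows_for_bikes: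
--         return True
--     else:
--         return False
-- ===== SOURCE B (Python) =====
-- def validity_of_lots_bikes(particular_lot, floors_for_bikes, columns_for_bikes, rows_for_bikes):
--     x = []
--     for field in particular_lot.split(','):
--         if not field.isdigit():
--             break
--         x.append(int(field))
--     if len(x) != 3:
--         return False
--     a, b, c = x
--     return 1 <= a <= floors_for_bikes and 1 <= b <= columns_for_bikes and 1 <= c <= rows_for_bikes
-- ===== Notes on version B (the rewrite author's own statement) =====
-- stated objective: simpler
-- what changed: Replaces the index/frozen-pointer comma scan that re-slices and re-tests isdigit on growing substrings by a single split(',') followed by a break-at-first-non-digit accumulation.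
import Mathlib
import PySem

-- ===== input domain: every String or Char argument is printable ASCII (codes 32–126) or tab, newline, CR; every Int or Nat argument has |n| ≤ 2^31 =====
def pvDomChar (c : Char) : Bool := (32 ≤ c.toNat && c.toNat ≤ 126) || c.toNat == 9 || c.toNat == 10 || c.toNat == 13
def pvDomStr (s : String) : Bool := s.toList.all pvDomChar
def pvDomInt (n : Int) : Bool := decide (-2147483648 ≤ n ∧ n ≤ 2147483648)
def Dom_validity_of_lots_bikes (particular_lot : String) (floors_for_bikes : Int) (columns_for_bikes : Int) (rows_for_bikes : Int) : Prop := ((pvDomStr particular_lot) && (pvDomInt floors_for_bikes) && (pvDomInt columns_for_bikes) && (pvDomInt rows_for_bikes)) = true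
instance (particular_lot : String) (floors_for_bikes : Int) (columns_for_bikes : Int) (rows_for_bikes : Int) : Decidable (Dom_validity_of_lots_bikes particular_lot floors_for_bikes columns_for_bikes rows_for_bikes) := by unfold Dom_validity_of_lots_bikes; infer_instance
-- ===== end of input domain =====

-- B replaces A's frozen-pointer comma scan (quadratic re-slicing) by split(',') plus break at the
-- first non-digit field: simpler, one pass. Return values proved equal on the whole domain.

-- ===== PORT A =====
-- the body of A's while-loop (only comma positions can change the state (j, x))
def pvBodyA (s : List Char) (st : Int × List Int) (i : Int) : Int × List Int :=
  if ¬ (PySem.List.pyGet? s i = some ',') then st          -- if particular_lot[i] != ',': pass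
  else if PySem.List.pyGet? s i = some ',' then            -- elif particular_lot[i] == ',':
    let seg := PySem.List.slice s (some (st.1 + 1)) (some i)
    if PySem.Chars.strIsdigit seg then                     -- if particular_lot[j+1:i].isdigit():
      (i, st.2 ++ [(PySem.Int.ofChars? seg).getD 0])       --   x.append(int(...)); j = i
    else st
  else st

def validity_of_lots_bikes (particular_lot : String) (floors_for_bikes : Int) (columns_for_bikes : Int) (rows_for_bikes : Int) : Bool :=
  let s := particular_lot.toList ++ [',']                  -- particular_lot += ','
  let st := (PySem.List.pyRange 0 (s.length : Int) 1).foldl (pvBodyA s) (-1, [])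
  let x := st.2
  if x.length = 3 ∧ 1 ≤ (PySem.List.pyGet? x 0).getD 0 ∧ (PySem.List.pyGet? x 0).getD 0 ≤ floors_for_bikes
     ∧ 1 ≤ (PySem.List.pyGet? x 1).getD 0 ∧ (PySem.List.pyGet? x 1).getD 0 ≤ columns_for_bikes
     ∧ 1 ≤ (PySem.List.pyGet? x 2).getD 0 ∧ (PySem.List.pyGet? x 2).getD 0 ≤ rows_for_bikes
  then true else false

-- ===== PORT B =====
-- the for-loop of Source B: accumulate int(field) while field.isdigit(), break at the first failure
def pvCollectFields : List (List Char) → List Int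
  | [] => []
  | fld :: rest =>
    if PySem.Chars.strIsdigit fld then (PySem.Int.ofChars? fld).getD 0 :: pvCollectFields rest
    else []

def validity_of_lots_bikes_alt (particular_lot : String) (floors_for_bikes : Int) (columns_for_bikes : Int) (rows_for_bikes : Int) : Bool :=
  let x := pvCollectFields (PySem.Chars.splitOn particular_lot.toList [','])
  match x with
  | [a, b, c] =>
    decide (1 ≤ a) && decide (a ≤ floors_for_bikes) && decide (1 ≤ b) && decide (b ≤ columns_for_bikes)
      && decide (1 ≤ c) && decide (c ≤ rows_for_bikes)
  | _ => false

-- ===== PRECONDITION & SPEC =====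
def Spec_validity_of_lots_bikes (particular_lot : String) (floors_for_bikes : Int) (columns_for_bikes : Int) (rows_for_bikes : Int) (out : Bool) : Prop := out = validity_of_lots_bikes_alt particular_lot floors_for_bikes columns_for_bikes rows_for_bikes
instance (particular_lot : String) (floors_for_bikes : Int) (columns_for_bikes : Int) (rows_for_bikes : Int) (out : Bool) : Decidable (Spec_validity_of_lots_bikes particular_lot floors_for_bikes columns_for_bikes rows_for_bikes out) := by unfold Spec_validity_of_lots_bikes; infer_instance

-- ===== CLAIM (what is proved, stated in full; the proofs are below) =====
def Claim_equal_validity_of_lots_bikes : Prop := ∀ (particular_lot : String) (floors_for_bikes : Int) (columns_for_bikes : Int) (rows_for_bikes : Int), Dom_validity_of_lots_bikes particular_lot floors_for_bikes columns_for_bikes rows_for_bikes → Spec_validity_of_lots_bikes particular_lot floors_for_bikes columns_for_bikes rows_for_bikes (validity_of_lots_bikes particular_lot floors_for_bikes columns_for_bikes rows_for_bikes)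

-- ===== LEMMAS AND PROOFS =====

-- a fuel-free reference form of splitting on a single comma
def pvSplitAux (cur : List Char) : List Char → List (List Char)
  | [] => [cur]
  | c :: rest => if c = ',' then cur :: pvSplitAux [] rest else pvSplitAux (cur ++ [c]) rest

theorem pvSplitAux_go (l : List Char) : ∀ (fuel : Nat) (cur : List Char) (acc : List (List Char)),
    l.length ≤ fuel →
    PySem.Chars.splitOn.go [','] fuel l cur acc = acc.reverse ++ pvSplitAux cur.reverse l := by
  induction l with
  | nil =>
    intro fuel cur acc _
    cases fuel <;> simp [PySem.Chars.splitOn.go, pvSplitAux]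
  | cons c rest ih =>
    intro fuel cur acc hf
    cases fuel with
    | zero => simp at hf
    | succ f =>
      by_cases hc : c = ','
      · subst hc
        have : PySem.Chars.splitOn.go [','] (f + 1) (',' :: rest) cur acc
            = PySem.Chars.splitOn.go [','] f rest [] (cur.reverse :: acc) := by
          simp [PySem.Chars.splitOn.go, List.isPrefixOf]
        rw [this, ih f [] (cur.reverse :: acc) (by simpa using hf)]
        simp [pvSplitAux]
      · have : PySem.Chars.splitOn.go [','] (f + 1) (c :: rest) cur acc
            = PySem.Chars.splitOn.go [','] f rest (c :: cur) acc := by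
          simp [PySem.Chars.splitOn.go, List.isPrefixOf, Ne.symm hc]
        rw [this, ih f (c :: cur) acc (by simpa using hf)]
        simp [pvSplitAux, hc]

theorem splitOn_eq_pvSplitAux (l : List Char) :
    PySem.Chars.splitOn l [','] = pvSplitAux [] l := by
  unfold PySem.Chars.splitOn
  rw [pvSplitAux_go l (l.length + 1) [] [] (by omega)]
  simp

theorem pvSplitAux_no_comma (u : List Char) (h : ',' ∉ u) : ∀ (cur : List Char),
    pvSplitAux cur u = [cur ++ u] := by
  induction u with
  | nil => intro cur; simp [pvSplitAux]
  | cons c rest ih =>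
    intro cur
    have hc : c ≠ ',' := fun hc => h (hc ▸ List.mem_cons_self)
    have hrest : ',' ∉ rest := fun hm => h (List.mem_cons_of_mem _ hm)
    simp [pvSplitAux, hc, ih hrest]

theorem pvSplitAux_comma (u : List Char) (h : ',' ∉ u) : ∀ (cur w : List Char),
    pvSplitAux cur (u ++ ',' :: w) = (cur ++ u) :: pvSplitAux [] w := by
  induction u with
  | nil => intro cur w; simp [pvSplitAux]
  | cons c rest ih =>
    intro cur w
    have hc : c ≠ ',' := fun hc => h (hc ▸ List.mem_cons_self)
    have hrest : ',' ∉ rest := fun hm => h (List.mem_cons_of_mem _ hm)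
    simp [pvSplitAux, hc, ih hrest]

theorem pvFold_no_comma (s : List Char) (a b : Nat) (st : Int × List Int)
    (h : ∀ i : Nat, a ≤ i → i < b → s[i]? ≠ some ',') :
    (PySem.List.pyRange (a : Int) (b : Int) 1).foldl (pvBodyA s) st = st := by
  rcases Nat.lt_or_ge a b with hab | hab
  · rw [PySem.List.pyRange_one_cons (by exact_mod_cast hab)]
    have hstep : pvBodyA s st (a : Int) = st := by
      unfold pvBodyA
      rw [PySem.List.pyGet?_natCast]
      simp [h a le_rfl hab]
    have hcast : ((a : Int) + 1) = ((a + 1 : Nat) : Int) := by push_cast; ring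
    rw [List.foldl_cons, hstep, hcast]
    exact pvFold_no_comma s (a + 1) b st (fun i h1 h2 => h i (by omega) h2)
  · rw [PySem.List.pyRange_one_eq_nil (by exact_mod_cast hab)]
    rfl
termination_by b - a

theorem comma_mem_slice (s : List Char) (j : Int) (a k : Nat)
    (hj : 0 ≤ j + 1) (hk1 : j + 1 ≤ (k : Int)) (hk2 : k < a) (hk3 : s[k]? = some ',') :
    ',' ∈ PySem.List.slice s (some (j + 1)) (some (a : Int)) := by
  rw [PySem.List.slice_toNat s hj (by positivity)]
  set t := (j + 1).toNat with ht
  have htk : t ≤ k := by omega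
  have hks : k < s.length := (List.getElem?_eq_some_iff.mp hk3).1
  have : ((s.drop t).take ((a : Int).toNat - t))[k - t]? = some ',' := by
    rw [List.getElem?_take_of_lt (by omega), List.getElem?_drop]
    rw [show t + (k - t) = k by omega]
    exact hk3
  exact List.mem_of_getElem? this

theorem strIsdigit_false_of_comma (l : List Char) (h : ',' ∈ l) :
    PySem.Chars.strIsdigit l = false := by
  unfold PySem.Chars.strIsdigit
  have : l.all PySem.Chars.isdigit = false := by
    rw [List.all_eq_false]
    exact ⟨',', h, by decide⟩
  simp [this]

theorem pvFold_dead (s : List Char) (a b : Nat) (j : Int) (x : List Int)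
    (k : Nat) (hk1 : j + 1 ≤ (k : Int)) (hk2 : k < a) (hk3 : s[k]? = some ',') (hj : 0 ≤ j + 1) :
    (PySem.List.pyRange (a : Int) (b : Int) 1).foldl (pvBodyA s) (j, x) = (j, x) := by
  rcases Nat.lt_or_ge a b with hab | hab
  · rw [PySem.List.pyRange_one_cons (by exact_mod_cast hab)]
    have hstep : pvBodyA s (j, x) (a : Int) = (j, x) := by
      unfold pvBodyA
      rw [PySem.List.pyGet?_natCast]
      by_cases hsa : s[a]? = some ','
      · have hmem := comma_mem_slice s j a k hj hk1 hk2 hk3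
        simp [hsa, strIsdigit_false_of_comma _ hmem]
      · simp [hsa]
    have hcast : ((a : Int) + 1) = ((a + 1 : Nat) : Int) := by push_cast; ring
    rw [List.foldl_cons, hstep, hcast]
    exact pvFold_dead s (a + 1) b j x k hk1 (by omega) hk3 hj
  · rw [PySem.List.pyRange_one_eq_nil (by exact_mod_cast hab)]
    rfl
termination_by b - a

theorem pvFold_main (v : List Char) (pre : List Char) (x : List Int) :
    ((PySem.List.pyRange (pre.length : Int) ((pre ++ v ++ [',']).length : Int) 1).foldl
      (pvBodyA (pre ++ v ++ [','])) ((pre.length : Int) - 1, x)).2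
      = x ++ pvCollectFields (pvSplitAux [] v) := by
  set s := pre ++ v ++ [','] with hs
  set u := v.takeWhile (· ≠ ',') with hu
  have hucf : ',' ∉ u := by
    intro hm
    have := List.mem_takeWhile_imp hm
    simp at this
  set off := pre.length with hoff
  set m := off + u.length with hm
  have hlen : s.length = pre.length + v.length + 1 := by simp [hs]; omega
  have hul : u.length ≤ v.length := by
    simpa [hu] using (List.takeWhile_prefix (p := (· ≠ ','))).length_le
  -- the string decomposes as (pre ++ u) ++ ',' :: T
  obtain ⟨T, hT, hrest⟩ :
      ∃ T, s = (pre ++ u) ++ ',' :: T ∧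
        (v.dropWhile (· ≠ ',') = [] ∧ T = [] ∨
         ∃ w, v.dropWhile (· ≠ ',') = ',' :: w ∧ T = w ++ [',']) := by
    rcases hdw : v.dropWhile (· ≠ ',') with _ | ⟨c, w⟩
    · have hv : v = u := by
        conv_lhs => rw [← List.takeWhile_append_dropWhile (p := (· ≠ ',')) (l := v)]
        rw [hdw]; simp [hu]
      exact ⟨[], by simp [hs, hv], Or.inl ⟨rfl, rfl⟩⟩
    · have hc : c = ',' := by
        have h2 := List.head?_dropWhile_not (fun x => decide (x ≠ ',')) v
        rw [hdw] at h2
        simpa using h2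
      subst hc
      have hv : v = u ++ ',' :: w := by
        conv_lhs => rw [← List.takeWhile_append_dropWhile (p := (· ≠ ',')) (l := v)]
        rw [hdw]
      exact ⟨w ++ [','], by simp [hs, hv], Or.inr ⟨w, rfl, rfl⟩⟩
  have hmlen : m < s.length := by omega
  have hoffm : (off : Int) ≤ (m : Int) := by omega
  have hmlen' : (m : Int) < ((s.length : Nat) : Int) := by exact_mod_cast hmlen
  rw [PySem.List.pyRange_one_append (off : Int) (m : Int) ((s.length : Nat) : Int) hoffm
    (le_of_lt hmlen'), List.foldl_append]
  have hnc : ∀ i : Nat, off ≤ i → i < m → s[i]? ≠ some ',' := by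
    intro i h1 h2 heq
    rw [hT, List.getElem?_append_left (by simp; omega),
      List.getElem?_append_right (by omega)] at heq
    exact hucf (List.mem_of_getElem? heq)
  rw [pvFold_no_comma s off m _ hnc, PySem.List.pyRange_one_cons hmlen', List.foldl_cons]
  have hsm : s[m]? = some ',' := by
    have hmeq : m = (pre ++ u).length := by simp; omega
    rw [hT, hmeq, List.getElem?_append_right le_rfl]
    simp
  have hseg : PySem.List.slice s (some ((off : Int) - 1 + 1)) (some (m : Int)) = u := by
    rw [show ((off : Int) - 1 + 1) = ((off : Nat) : Int) by ring, PySem.List.slice_natCast]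
    have hdrop : s.drop off = u ++ ',' :: T := by
      rw [hT, show (pre ++ u) ++ ',' :: T = pre ++ (u ++ ',' :: T) by simp, hoff,
        List.drop_left]
    rw [hdrop, show m - off = u.length by omega, List.take_left]
  have hbody : pvBodyA s ((off : Int) - 1, x) (m : Int)
      = if PySem.Chars.strIsdigit u then
          ((m : Int), x ++ [(PySem.Int.ofChars? u).getD 0])
        else ((off : Int) - 1, x) := by
    unfold pvBodyA
    rw [PySem.List.pyGet?_natCast]
    simp only [hsm, hseg]
    simp
  rw [hbody]
  by_cases hd : PySem.Chars.strIsdigit u = true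
  · rw [if_pos hd]
    rcases hrest with ⟨hdw, hTnil⟩ | ⟨w, hdw, hTw⟩
    · -- no comma in v : the remaining range is empty
      have hv : v = u := by
        conv_lhs => rw [← List.takeWhile_append_dropWhile (p := (· ≠ ',')) (l := v)]
        rw [hdw]; simp [hu]
      have hslen : s.length = m + 1 := by
        rw [hT, hTnil]; simp; omega
      rw [PySem.List.pyRange_one_eq_nil (by omega), List.foldl_nil]
      rw [hv, pvSplitAux_no_comma u hucf []]
      simp [pvCollectFields, hd]
    · -- v = u ++ ',' :: w : recurse on w
      have hv : v = u ++ ',' :: w := by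
        conv_lhs => rw [← List.takeWhile_append_dropWhile (p := (· ≠ ',')) (l := v)]
        rw [hdw]
      have hs' : s = (pre ++ u ++ [',']) ++ w ++ [','] := by
        rw [hT, hTw]; simp
      have hpre' : (pre ++ u ++ [',']).length = m + 1 := by simp; omega
      have hrec := pvFold_main w (pre ++ u ++ [',']) (x ++ [(PySem.Int.ofChars? u).getD 0])
      rw [hpre', show ((m + 1 : Nat) : Int) - 1 = (m : Int) by push_cast; ring, ← hs'] at hrec
      rw [show ((m : Int) + 1) = ((m + 1 : Nat) : Int) by push_cast; ring, hrec,
        hv, pvSplitAux_comma u hucf [] w]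
      simp [pvCollectFields, hd]
  · rw [if_neg hd]
    have hdead := pvFold_dead s (m + 1) s.length ((off : Int) - 1) x m
      (by omega) (by omega) hsm (by omega)
    rw [show ((m : Int) + 1) = ((m + 1 : Nat) : Int) by push_cast; ring, hdead]
    have hcoll : pvCollectFields (pvSplitAux [] v) = [] := by
      rcases hrest with ⟨hdw, hTnil⟩ | ⟨w, hdw, hTw⟩
      · have hv : v = u := by
          conv_lhs => rw [← List.takeWhile_append_dropWhile (p := (· ≠ ',')) (l := v)]
          rw [hdw]; simp [hu]
        rw [hv, pvSplitAux_no_comma u hucf []]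
        simp [pvCollectFields, hd]
      · have hv : v = u ++ ',' :: w := by
          conv_lhs => rw [← List.takeWhile_append_dropWhile (p := (· ≠ ',')) (l := v)]
          rw [hdw]
        rw [hv, pvSplitAux_comma u hucf [] w]
        simp [pvCollectFields, hd]
    rw [hcoll]
    simp
termination_by v.length
decreasing_by
  rw [hv]
  simp
  omega

-- ===== VERDICT (by name: the statement is the Claim_ definition above) =====
theorem pvFinal_check (L : List Int) (f c r : Int) :
    (if L.length = 3 ∧ 1 ≤ (PySem.List.pyGet? L 0).getD 0 ∧ (PySem.List.pyGet? L 0).getD 0 ≤ f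
        ∧ 1 ≤ (PySem.List.pyGet? L 1).getD 0 ∧ (PySem.List.pyGet? L 1).getD 0 ≤ c
        ∧ 1 ≤ (PySem.List.pyGet? L 2).getD 0 ∧ (PySem.List.pyGet? L 2).getD 0 ≤ r
     then true else false)
    = (match L with
       | [a, b, cc] => decide (1 ≤ a) && decide (a ≤ f) && decide (1 ≤ b) && decide (b ≤ c)
           && decide (1 ≤ cc) && decide (cc ≤ r)
       | _ => false) := by
  match L with
  | [] => simp
  | [a] => simp
  | [a, b] => simp
  | [a, b, cc] =>
    simp [PySem.List.pyGet?, PySem.List.pyIdx?, Bool.and_assoc]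
  | a :: b :: cc :: d :: rest => simp

theorem validity_of_lots_bikes_spec : Claim_equal_validity_of_lots_bikes := by
  intro particular_lot floors_for_bikes columns_for_bikes rows_for_bikes _
  unfold Spec_validity_of_lots_bikes validity_of_lots_bikes validity_of_lots_bikes_alt
  have hx := pvFold_main particular_lot.toList [] []
  simp only [List.nil_append, List.length_nil, Nat.cast_zero, zero_sub] at hx
  rw [splitOn_eq_pvSplitAux]
  simp only [hx]
  exact pvFinal_check _ _ _ _
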